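-- pv_equiv track=rewrite | github.com/DougMackenzie/power-insight | scripts/migrate_tariff_excel_to_ts.py | create_tariff_id
-- ===== SOURCE A (Python) =====
-- def create_tariff_id(utility_name, state):
--     """Create a unique tariff ID from utility name and state."""
--     clean_name = utility_name.lower()
--     clean_name = clean_name.replace(' ', '-')
--     clean_name = clean_name.replace('&', 'and')
--     clean_name = clean_name.replace(',', '')
--     clean_name = clean_name.replace('.', '')
--     clean_name = clean_name.replace("'", '')
--     clean_name = clean_name.replace('(', '')
--     clean_name = clean_name.replace(')', '')
--     clean_name = ''.join(c for c in clean_name if c.isalnum() or c == '-')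
--     while '--' in clean_name:
--         clean_name = clean_name.replace('--', '-')
--     state_code = str(state).split('/')[0].strip().lower() if state else 'xx'
--     return f"{clean_name}-{state_code}"
-- ===== SOURCE B (Python) =====
-- def create_tariff_id(utility_name, state):
--     """Create a unique tariff ID from utility name and state."""
--     out = []
--     for c in utility_name.lower():
--         if c == ' ' or c == '-':
--             if not (out and out[-1] == '-'):
--                 out.append('-')
--         elif c == '&':
--             out.append('a')
--             out.append('n')
--             out.append('d')
--         elif c.isalnum():
--             out.append(c)
--     state_code = str(state).split('/')[0].strip().lower() if state else 'xx'
--     return f"{''.join(out)}-{state_code}"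
-- ===== Notes on version B (the rewrite author's own statement) =====
-- stated objective: alternative
-- what changed: B replaces A's eight whole-string replace passes, a filtering join and a while-loop dash-collapse with a single left-to-right scan that emits '-', 'and' or the kept character and skips a dash when the previously emitted character is already a dash.
import Mathlib
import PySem

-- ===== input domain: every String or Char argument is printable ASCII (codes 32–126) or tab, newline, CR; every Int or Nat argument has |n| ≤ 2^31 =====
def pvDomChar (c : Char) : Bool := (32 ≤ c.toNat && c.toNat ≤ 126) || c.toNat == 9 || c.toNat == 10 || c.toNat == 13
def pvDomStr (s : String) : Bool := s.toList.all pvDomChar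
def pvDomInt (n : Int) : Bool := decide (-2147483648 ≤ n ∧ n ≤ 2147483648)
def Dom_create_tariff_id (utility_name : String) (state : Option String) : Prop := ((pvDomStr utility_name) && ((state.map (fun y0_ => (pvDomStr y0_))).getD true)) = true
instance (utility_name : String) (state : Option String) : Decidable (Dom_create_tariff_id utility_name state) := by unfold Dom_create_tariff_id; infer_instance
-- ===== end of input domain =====

-- B replaces A's chain of whole-string replace passes, filtering join and while-loop dash-collapse by a single left-to-right scan producing the same string.


-- ===== PORT A =====
-- one pass of `clean_name.replace('--', '-')` written structurally; used only to prove
-- that A's while loop terminates (each pass strictly shortens the string while '--' occurs)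
def pvRdd : List Char → List Char
  | '-' :: '-' :: t => '-' :: pvRdd t
  | c :: t => c :: pvRdd t
  | [] => []

theorem pvRdd_dd (t : List Char) : pvRdd ('-' :: '-' :: t) = '-' :: pvRdd t := rfl

theorem pvRdd_cons (c : Char) (t : List Char) (h : ¬(c = '-' ∧ t.head? = some '-')) :
    pvRdd (c :: t) = c :: pvRdd t := by
  rw [pvRdd.eq_def]
  split
  · simp_all
  · rename_i heq; injection heq with h1 h2; subst h1; subst h2; rfl
  · simp_all

theorem pv_go_zero (old new l acc : List Char) :
    PySem.Chars.replace.go old new 0 l acc = acc.reverse ++ l := by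
  rw [PySem.Chars.replace.go.eq_def]

theorem pv_go_nil (old new : List Char) (fuel : Nat) (acc : List Char) :
    PySem.Chars.replace.go old new (fuel + 1) [] acc = acc.reverse := by
  rw [PySem.Chars.replace.go.eq_def]

theorem pv_go_succ (old new : List Char) (fuel : Nat) (c : Char) (t acc : List Char) :
    PySem.Chars.replace.go old new (fuel + 1) (c :: t) acc =
      if old.isPrefixOf (c :: t) then
        PySem.Chars.replace.go old new fuel (List.drop old.length (c :: t)) (new.reverse ++ acc)
      else PySem.Chars.replace.go old new fuel t (c :: acc) := by
  rw [PySem.Chars.replace.go.eq_def]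

theorem pv_go_dd (fuel : Nat) :
    ∀ l acc : List Char, l.length ≤ fuel →
      PySem.Chars.replace.go ['-', '-'] ['-'] fuel l acc = acc.reverse ++ pvRdd l := by
  induction fuel with
  | zero =>
    intro l acc h
    have hl : l = [] := by cases l <;> simp_all
    subst hl; rw [pv_go_zero]; simp [pvRdd]
  | succ n ih =>
    intro l acc h
    match l with
    | [] => rw [pv_go_nil]; simp [pvRdd]
    | [c] =>
      rw [pv_go_succ]
      have hp : (['-', '-'].isPrefixOf [c]) = false := by simp [List.isPrefixOf]
      rw [hp]
      simp only [Bool.false_eq_true, if_false]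
      rw [ih [] (c :: acc) (by simp)]
      rw [pvRdd_cons c [] (by simp)]
      simp [pvRdd]
    | c :: c2 :: t2 =>
      rw [pv_go_succ]
      by_cases hc : c = '-' ∧ c2 = '-'
      · obtain ⟨rfl, rfl⟩ := hc
        have hp : (['-', '-'].isPrefixOf ('-' :: '-' :: t2)) = true := by
          simp [List.isPrefixOf]
        rw [hp]
        simp only [if_true]
        rw [show List.drop (['-', '-'] : List Char).length ('-' :: '-' :: t2) = t2 from rfl]
        rw [show ((['-'] : List Char).reverse ++ acc) = '-' :: acc from rfl]
        rw [ih t2 ('-' :: acc) (by simp at h; omega), pvRdd_dd]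
        simp
      · have hp : (['-', '-'].isPrefixOf (c :: c2 :: t2)) = false := by
          simp [List.isPrefixOf]
          intro h1 h2; exact hc ⟨h1.symm, h2.symm⟩
        rw [hp]
        simp only [Bool.false_eq_true, if_false]
        rw [ih (c2 :: t2) (c :: acc) (by simp at h ⊢; omega)]
        rw [pvRdd_cons c (c2 :: t2) (by simp; intro h1 h2; exact hc ⟨h1, h2⟩)]
        simp

theorem pv_replace_dd (s : List Char) :
    PySem.Chars.replace s ['-', '-'] ['-'] = pvRdd s := by
  rw [PySem.Chars.replace]
  simp only [List.isEmpty_cons, Bool.false_eq_true, if_false]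
  rw [pv_go_dd s.length s [] le_rfl]
  simp

theorem pvRdd_length_le (s : List Char) : (pvRdd s).length ≤ s.length := by
  induction s using pvRdd.induct <;> simp [pvRdd] <;> omega

theorem pvRdd_length_lt (s : List Char) (h : ['-', '-'] <:+: s) :
    (pvRdd s).length < s.length := by
  induction s using pvRdd.induct with
  | case1 t =>
    rw [pvRdd_dd]
    have := pvRdd_length_le t
    simp; omega
  | case2 c t hne ih =>
    have hct : pvRdd (c :: t) = c :: pvRdd t := by
      rw [pvRdd.eq_def]
      split
      · rename_i t' heq; exfalso; injection heq with e1 e2; exact hne t' e1 e2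
      · rename_i heq; injection heq with e1 e2; subst e1; subst e2; rfl
      · simp_all
    rw [hct]
    have ht : ['-', '-'] <:+: t := by
      rcases h with ⟨p, q, hpq⟩
      rcases p with _ | ⟨p0, p'⟩
      · have he : ('-' : Char) :: '-' :: q = c :: t := by simpa using hpq
        injection he with e1 e2
        exact (hne q e1.symm e2.symm).elim
      · have he : p0 :: (p' ++ ['-', '-'] ++ q) = c :: t := by simpa using hpq
        injection he with e1 e2
        exact ⟨p', q, by simpa using e2⟩
    have := ih ht
    simp; omega
  | case3 =>
    have := h.length_le
    simp at this

theorem pv_collapse_step (s : List Char) (h : PySem.Chars.isIn ['-', '-'] s = true) :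
    (PySem.Chars.replace s ['-', '-'] ['-']).length < s.length := by
  rw [pv_replace_dd]
  exact pvRdd_length_lt s ((PySem.Chars.isIn_iff_infix _ _).mp h)

-- `while '--' in clean_name: clean_name = clean_name.replace('--', '-')`
def pvCollapseA (s : List Char) : List Char :=
  if hdd : PySem.Chars.isIn ['-', '-'] s = true then
    pvCollapseA (PySem.Chars.replace s ['-', '-'] ['-'])
  else s
termination_by s.length
decreasing_by exact pv_collapse_step s hdd

def create_tariff_id (utility_name : String) (state : Option String) : String :=
  let c0 := PySem.Chars.lower utility_name.toList
  let c1 := PySem.Chars.replace c0 [' '] ['-']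
  let c2 := PySem.Chars.replace c1 ['&'] ['a', 'n', 'd']
  let c3 := PySem.Chars.replace c2 [','] []
  let c4 := PySem.Chars.replace c3 ['.'] []
  let c5 := PySem.Chars.replace c4 ['\''] []
  let c6 := PySem.Chars.replace c5 ['('] []
  let c7 := PySem.Chars.replace c6 [')'] []
  let c8 := c7.filter (fun ch => PySem.Chars.isalnum ch || ch == '-')
  let c9 := pvCollapseA c8
  let code : List Char :=
    match state with
    | none => ['x', 'x']
    | some s =>
      if s = "" then ['x', 'x']
      else PySem.Chars.lower (PySem.Chars.strip ((PySem.Chars.splitOn s.toList ['/']).headD []))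
  String.ofList (c9 ++ '-' :: code)

-- ===== PORT B =====
-- Source B's single scan; out is built in reverse (Python appends and inspects out[-1]; here we cons and inspect head?)
def pvScanB (acc : List Char) : List Char → List Char
  | [] => acc.reverse
  | c :: rest =>
    if c == ' ' || c == '-' then
      if acc.head? == some '-' then pvScanB acc rest else pvScanB ('-' :: acc) rest
    else if c == '&' then pvScanB ('d' :: 'n' :: 'a' :: acc) rest
    else if PySem.Chars.isalnum c then pvScanB (c :: acc) rest
    else pvScanB acc rest

def create_tariff_id_alt (utility_name : String) (state : Option String) : String :=
  let cleaned := pvScanB [] (PySem.Chars.lower utility_name.toList)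
  let code : List Char :=
    match state with
    | none => ['x', 'x']
    | some s =>
      if s = "" then ['x', 'x']
      else PySem.Chars.lower (PySem.Chars.strip ((PySem.Chars.splitOn s.toList ['/']).headD []))
  String.ofList (cleaned ++ '-' :: code)

-- ===== PRECONDITION & SPEC =====
def Spec_create_tariff_id (utility_name : String) (state : Option String) (out : String) : Prop := out = create_tariff_id_alt utility_name state
instance (utility_name : String) (state : Option String) (out : String) : Decidable (Spec_create_tariff_id utility_name state out) := by unfold Spec_create_tariff_id; infer_instance

-- ===== CLAIM (what is proved, stated in full; the proofs are below) =====
def Claim_equal_create_tariff_id : Prop := ∀ (utility_name : String) (state : Option String), Dom_create_tariff_id utility_name state → Spec_create_tariff_id utility_name state (create_tariff_id utility_name state)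

-- ===== LEMMAS AND PROOFS =====

-- the per-character effect of A's replace/filter pipeline (and of B's scan branches)
def pvG (c : Char) : List Char :=
  if c = ' ' ∨ c = '-' then ['-']
  else if c = '&' then ['a', 'n', 'd']
  else if PySem.Chars.isalnum c then [c] else []

def pvD (t : List Char) : List Char := t.dropWhile (fun x => x == '-')

-- collapse every run of dashes to a single dash (the fixpoint A's while loop reaches)
def pvSqueeze : List Char → List Char
  | [] => []
  | c :: t => if c = '-' then '-' :: pvSqueeze (pvD t) else c :: pvSqueeze t
termination_by s => s.length
decreasing_by
  · have := List.length_dropWhile_le (fun x => x == '-') t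
    simp [pvD]; omega
  · simp

theorem pvSqueeze_nil : pvSqueeze [] = [] := by rw [pvSqueeze.eq_def]

theorem pvSqueeze_dash (t : List Char) : pvSqueeze ('-' :: t) = '-' :: pvSqueeze (pvD t) := by
  rw [pvSqueeze.eq_def]; simp

theorem pvSqueeze_cons (c : Char) (t : List Char) (hc : c ≠ '-') :
    pvSqueeze (c :: t) = c :: pvSqueeze t := by
  rw [pvSqueeze.eq_def]; simp [hc]

theorem pvD_nil : pvD [] = [] := rfl

theorem pvD_dash (t : List Char) : pvD ('-' :: t) = pvD t := by
  simp [pvD, List.dropWhile]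

theorem pvD_cons (c : Char) (t : List Char) (hc : c ≠ '-') : pvD (c :: t) = c :: t := by
  have hb : (c == '-') = false := by simp [hc]
  simp [pvD, List.dropWhile, hb]

theorem pv_go_single (a : Char) (w : List Char) (fuel : Nat) :
    ∀ l acc : List Char, l.length ≤ fuel →
      PySem.Chars.replace.go [a] w fuel l acc =
        acc.reverse ++ l.flatMap (fun c => if c = a then w else [c]) := by
  induction fuel with
  | zero =>
    intro l acc h
    have hl : l = [] := by cases l <;> simp_all
    subst hl; rw [pv_go_zero]; simp
  | succ n ih =>
    intro l acc h
    match l with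
    | [] => rw [pv_go_nil]; simp
    | c :: t =>
      rw [pv_go_succ]
      have hlen : t.length ≤ n := by simp at h; omega
      by_cases hc : c = a
      · subst hc
        have hp : ([c].isPrefixOf (c :: t)) = true := by simp [List.isPrefixOf]
        rw [hp]
        simp only [if_true]
        rw [show List.drop ([c] : List Char).length (c :: t) = t from rfl]
        rw [ih t (w.reverse ++ acc) hlen]
        simp
      · have hp : ([a].isPrefixOf (c :: t)) = false := by
          simp [List.isPrefixOf]; exact fun e => hc e.symm
        rw [hp]
        simp only [Bool.false_eq_true, if_false]
        rw [ih t (c :: acc) hlen]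
        simp [hc]

theorem pv_replace_single (a : Char) (w l : List Char) :
    PySem.Chars.replace l [a] w = l.flatMap (fun c => if c = a then w else [c]) := by
  rw [PySem.Chars.replace]
  simp only [List.isEmpty_cons, Bool.false_eq_true, if_false]
  rw [pv_go_single a w l.length l [] le_rfl]
  simp

theorem pv_pipe_eq (L : List Char) :
    (PySem.Chars.replace (PySem.Chars.replace (PySem.Chars.replace (PySem.Chars.replace
      (PySem.Chars.replace (PySem.Chars.replace (PySem.Chars.replace L [' '] ['-'])
        ['&'] ['a', 'n', 'd']) [','] []) ['.'] []) ['\''] []) ['('] []) [')'] []).filter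
      (fun ch => PySem.Chars.isalnum ch || ch == '-') = L.flatMap pvG := by
  simp only [pv_replace_single, List.flatMap_assoc, List.filter_flatMap]
  congr 1
  funext c
  by_cases h1 : c = ' '
  · subst h1; decide
  by_cases h2 : c = '-'
  · subst h2; decide
  by_cases h3 : c = '&'
  · subst h3; decide
  by_cases h4 : c = ','
  · subst h4; decide
  by_cases h5 : c = '.'
  · subst h5; decide
  by_cases h6 : c = '\''
  · subst h6; decide
  by_cases h7 : c = '('
  · subst h7; decide
  by_cases h8 : c = ')'
  · subst h8; decide
  simp only [pvG, h1, h2, h3, h4, h5, h6, h7, h8, if_false, or_self, List.flatMap_cons,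
    List.flatMap_nil, List.append_nil, List.filter_cons, List.filter_nil]
  cases han : PySem.Chars.isalnum c <;> simp [h2]

theorem pvSqueeze_of_no_dd (s : List Char) (h : ¬ ['-', '-'] <:+: s) : pvSqueeze s = s := by
  induction s with
  | nil => exact pvSqueeze_nil
  | cons c t ih =>
    have ht : ¬ ['-', '-'] <:+: t := fun hinf => h (hinf.trans (List.suffix_cons c t).isInfix)
    by_cases hc : c = '-'
    · subst hc
      have hhead : t.head? ≠ some '-' := by
        intro hh
        cases t with
        | nil => simp at hh
        | cons c2 t2 =>
          simp at hh
          exact h ⟨[], t2, by simp [hh]⟩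
      have hD : pvD t = t := by
        cases t with
        | nil => rfl
        | cons c2 t2 =>
          simp at hhead
          exact pvD_cons c2 t2 hhead
      rw [pvSqueeze_dash, hD, ih ht]
    · rw [pvSqueeze_cons c t hc, ih ht]

theorem pvSqueeze_rdd_aux (n : Nat) :
    ∀ s : List Char, s.length ≤ n →
      pvSqueeze (pvRdd s) = pvSqueeze s ∧ pvSqueeze (pvD (pvRdd s)) = pvSqueeze (pvD s) := by
  induction n with
  | zero =>
    intro s h
    have hl : s = [] := by cases s <;> simp_all
    subst hl
    exact ⟨rfl, rfl⟩
  | succ n ih =>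
    intro s h
    rcases s with _ | ⟨c, t⟩
    · exact ⟨rfl, rfl⟩
    by_cases hc : c = '-'
    · subst hc
      rcases t with _ | ⟨c2, t2⟩
      · rw [pvRdd_cons '-' [] (by simp)]
        exact ⟨rfl, rfl⟩
      by_cases hc2 : c2 = '-'
      · subst hc2
        have hlen : t2.length ≤ n := by simp at h; omega
        obtain ⟨_, ihB⟩ := ih t2 hlen
        constructor
        · rw [pvRdd_dd, pvSqueeze_dash, pvSqueeze_dash, pvD_dash, ihB]
        · rw [pvRdd_dd, pvD_dash, pvD_dash, pvD_dash, ihB]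
      · have hlen2 : (c2 :: t2).length ≤ n := by simp at h ⊢; omega
        have hlen : t2.length ≤ n := by simp at h; omega
        obtain ⟨ihA2, _⟩ := ih (c2 :: t2) hlen2
        obtain ⟨ihA, _⟩ := ih t2 hlen
        have e1 : pvRdd ('-' :: c2 :: t2) = '-' :: pvRdd (c2 :: t2) :=
          pvRdd_cons _ _ (by simp [hc2])
        have e2 : pvRdd (c2 :: t2) = c2 :: pvRdd t2 :=
          pvRdd_cons _ _ (by simp [hc2])
        constructor
        · rw [e1, pvSqueeze_dash, pvSqueeze_dash, e2, pvD_cons c2 _ hc2, pvD_cons c2 _ hc2,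
            pvSqueeze_cons c2 _ hc2, pvSqueeze_cons c2 _ hc2, ihA]
        · rw [e1, pvD_dash, pvD_dash, e2, pvD_cons c2 _ hc2, pvD_cons c2 _ hc2, ← e2, ihA2]
    · have hlen : t.length ≤ n := by simp at h; omega
      obtain ⟨ihA, _⟩ := ih t hlen
      have e : pvRdd (c :: t) = c :: pvRdd t := pvRdd_cons _ _ (by simp [hc])
      rw [e, pvD_cons c _ hc, pvD_cons c _ hc, pvSqueeze_cons c _ hc, pvSqueeze_cons c _ hc, ihA]
      exact ⟨rfl, rfl⟩

theorem pvSqueeze_rdd (s : List Char) : pvSqueeze (pvRdd s) = pvSqueeze s :=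
  (pvSqueeze_rdd_aux s.length s le_rfl).1

theorem pvCollapseA_eq_squeeze_aux (n : Nat) :
    ∀ s : List Char, s.length ≤ n → pvCollapseA s = pvSqueeze s := by
  induction n with
  | zero =>
    intro s h
    have hl : s = [] := by cases s <;> simp_all
    subst hl
    rw [pvCollapseA]
    have hin : PySem.Chars.isIn ['-', '-'] ([] : List Char) = false := by
      rw [PySem.Chars.isIn_eq_false_iff]
      intro hinf
      have := hinf.length_le
      simp at this
    rw [dif_neg (by simp [hin]), pvSqueeze_nil]
  | succ n ih =>
    intro s h
    by_cases hin : PySem.Chars.isIn ['-', '-'] s = true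
    · rw [pvCollapseA, dif_pos hin, pv_replace_dd]
      have hlt : (pvRdd s).length < s.length :=
        pvRdd_length_lt s ((PySem.Chars.isIn_iff_infix _ _).mp hin)
      rw [ih (pvRdd s) (by omega)]
      exact pvSqueeze_rdd s
    · rw [pvCollapseA, dif_neg hin]
      have hfalse : PySem.Chars.isIn ['-', '-'] s = false := by
        cases hb : PySem.Chars.isIn ['-', '-'] s
        · rfl
        · exact absurd hb hin
      exact (pvSqueeze_of_no_dd s ((PySem.Chars.isIn_eq_false_iff _ _).mp hfalse)).symm

theorem pvCollapseA_eq_squeeze (s : List Char) : pvCollapseA s = pvSqueeze s :=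
  pvCollapseA_eq_squeeze_aux s.length s le_rfl

theorem pvScanB_eq (l : List Char) :
    ∀ acc : List Char,
      pvScanB acc l = acc.reverse ++
        (if acc.head? = some '-' then pvSqueeze (pvD (l.flatMap pvG))
         else pvSqueeze (l.flatMap pvG)) := by
  induction l with
  | nil =>
    intro acc
    simp only [pvScanB, List.flatMap_nil, pvD_nil, pvSqueeze_nil]
    simp
  | cons c rest ih =>
    intro acc
    by_cases h1 : c = ' ' ∨ c = '-'
    · have hb : (c == ' ' || c == '-') = true := by
        rcases h1 with h1 | h1 <;> simp [h1]
      have hgc : pvG c = ['-'] := by simp [pvG, h1]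
      simp only [pvScanB, hb, if_true, List.flatMap_cons, hgc, List.cons_append, List.nil_append]
      by_cases hd : acc.head? = some '-'
      · rw [if_pos (by simp [hd])]
        rw [ih acc, if_pos hd]
        rw [if_pos hd, pvD_dash]
      · rw [if_neg (by simp [hd])]
        rw [ih ('-' :: acc)]
        rw [if_pos (by simp)]
        rw [if_neg hd, pvSqueeze_dash]
        simp
    · have hb : (c == ' ' || c == '-') = false := by
        simp only [not_or] at h1
        simp [h1.1, h1.2]
      have hc2 : c ≠ '-' := (not_or.mp h1).2
      by_cases h2 : c = '&'
      · subst h2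
        simp only [pvScanB, hb, Bool.false_eq_true, if_false, if_true, beq_self_eq_true]
        rw [ih ('d' :: 'n' :: 'a' :: acc), if_neg (by simp)]
        have hgc : pvG '&' = ['a', 'n', 'd'] := by decide
        simp only [List.flatMap_cons, hgc, List.cons_append, List.nil_append]
        have hsq : pvSqueeze ('a' :: 'n' :: 'd' :: rest.flatMap pvG) =
            'a' :: 'n' :: 'd' :: pvSqueeze (rest.flatMap pvG) := by
          rw [pvSqueeze_cons _ _ (by decide), pvSqueeze_cons _ _ (by decide),
            pvSqueeze_cons _ _ (by decide)]
        rw [show pvD ('a' :: 'n' :: 'd' :: rest.flatMap pvG) =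
            'a' :: 'n' :: 'd' :: rest.flatMap pvG from pvD_cons _ _ (by decide)]
        rw [hsq]
        split <;> simp
      · by_cases h3 : PySem.Chars.isalnum c = true
        · have hgc : pvG c = [c] := by simp [pvG, h1, h2, h3]
          simp only [pvScanB, hb, Bool.false_eq_true, if_false, h3, if_true,
            show (c == '&') = false by simp [h2]]
          rw [ih (c :: acc), if_neg (by simp [hc2])]
          simp only [List.flatMap_cons, hgc, List.cons_append, List.nil_append]
          rw [pvD_cons c _ hc2, pvSqueeze_cons c _ hc2]
          split <;> simp
        · have hgc : pvG c = [] := by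
            simp only [pvG, h1, if_false]
            simp [h2, h3]
          simp only [pvScanB, hb, Bool.false_eq_true, if_false,
            show (c == '&') = false by simp [h2],
            show PySem.Chars.isalnum c = false by simpa using h3]
          rw [ih acc]
          simp only [List.flatMap_cons, hgc, List.nil_append]

-- ===== VERDICT (by name: the statement is the Claim_ definition above) =====
theorem create_tariff_id_spec : Claim_equal_create_tariff_id := by
  intro u st _
  unfold Spec_create_tariff_id
  have h2 := pvScanB_eq (PySem.Chars.lower u.toList) []
  simp only [List.head?_nil, List.reverse_nil, List.nil_append, reduceCtorEq, if_false] at h2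
  simp only [create_tariff_id, create_tariff_id_alt]
  rw [pv_pipe_eq, pvCollapseA_eq_squeeze, h2]
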